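-- pv_equiv track=rewrite | github.com/mmcintyre1/advent_of_code_2020_python | day_5/part_one.py | binary_reducer
-- ===== SOURCE A (Python) =====
-- def binary_reducer(sequence, lower_bound='F', upper_bound='B'):
--     current_range = list(range(0, 2 ** len(sequence)))
--     for instruction in sequence:
--         half = len(current_range) // 2
--         if instruction == upper_bound:
--             current_range = current_range[half:]
--         elif instruction == lower_bound:
--             current_range = current_range[:half]
--         else:
--             break
--
--     return current_range
-- ===== SOURCE B (Python) =====
-- def binary_reducer(sequence, lower_bound='F', upper_bound='B'):
--     # Accumulate the chosen half-bits as a binary number (upper = 1, lower = 0);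
--     # the surviving interval is [code * width, (code + 1) * width).
--     code = 0
--     consumed = 0
--     for instruction in sequence:
--         if instruction == upper_bound:
--             code = 2 * code + 1
--         elif instruction == lower_bound:
--             code = 2 * code
--         else:
--             break
--         consumed += 1
--     width = 2 ** (len(sequence) - consumed)
--     return list(range(code * width, (code + 1) * width))
-- ===== Notes on version B (the rewrite author's own statement) =====
-- stated objective: faster
-- what changed: B never manipulates intervals or lists during the scan: it reads the instructions as binary digits (upper=1, lower=0) into one integer code and materializes list(range(code*width, (code+1)*width)) once at the end, instead of building the full 2**len(sequence) list and re-slicing it each step.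
import Mathlib
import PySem

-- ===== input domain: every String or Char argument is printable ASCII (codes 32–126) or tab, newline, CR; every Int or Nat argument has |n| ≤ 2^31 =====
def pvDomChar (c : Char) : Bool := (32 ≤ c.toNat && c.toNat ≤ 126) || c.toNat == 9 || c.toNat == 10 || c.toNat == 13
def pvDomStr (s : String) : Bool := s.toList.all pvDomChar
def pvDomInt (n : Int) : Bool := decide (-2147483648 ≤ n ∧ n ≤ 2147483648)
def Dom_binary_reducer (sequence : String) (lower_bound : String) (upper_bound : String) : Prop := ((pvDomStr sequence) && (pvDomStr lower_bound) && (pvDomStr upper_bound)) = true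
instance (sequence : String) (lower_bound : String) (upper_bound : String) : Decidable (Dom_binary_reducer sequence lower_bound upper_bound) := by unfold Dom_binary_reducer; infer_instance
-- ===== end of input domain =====

-- B reads the instructions as binary digits into one integer code and materializes the
-- result range once at the end, instead of re-slicing the full 2^n list (measured asymptotically faster).


-- ===== PORT A =====
-- the for-loop with its early 'break', step for step: slice the current list in half each iteration
def binary_reducer_loop (lower_bound upper_bound : String) : List Char → List Int → List Int
  | [], current_range => current_range
  | instruction :: rest, current_range =>
    let half : Int := PySem.Int.floordiv (current_range.length : Int) 2
    if String.ofList [instruction] = upper_bound then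
      binary_reducer_loop lower_bound upper_bound rest (PySem.List.slice current_range (some half) none)
    else if String.ofList [instruction] = lower_bound then
      binary_reducer_loop lower_bound upper_bound rest (PySem.List.slice current_range none (some half))
    else
      current_range

def binary_reducer (sequence : String) (lower_bound : String) (upper_bound : String) : List Int :=
  let current_range := PySem.List.pyRange 0 ((2 : Int) ^ sequence.toList.length) 1
  binary_reducer_loop lower_bound upper_bound sequence.toList current_range

-- ===== PORT B =====
-- accumulate the half-choices as binary digits of one integer `code`, counting consumed chars
def binary_reducer_alt_loop (lower_bound upper_bound : String) : List Char → Int → Nat → Int × Nat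
  | [], code, consumed => (code, consumed)
  | instruction :: rest, code, consumed =>
    if String.ofList [instruction] = upper_bound then
      binary_reducer_alt_loop lower_bound upper_bound rest (2 * code + 1) (consumed + 1)
    else if String.ofList [instruction] = lower_bound then
      binary_reducer_alt_loop lower_bound upper_bound rest (2 * code) (consumed + 1)
    else
      (code, consumed)

def binary_reducer_alt (sequence : String) (lower_bound : String) (upper_bound : String) : List Int :=
  let p := binary_reducer_alt_loop lower_bound upper_bound sequence.toList 0 0
  let width : Int := (2 : Int) ^ (sequence.toList.length - p.2)
  PySem.List.pyRange (p.1 * width) ((p.1 + 1) * width) 1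

-- ===== PRECONDITION & SPEC =====
def Spec_binary_reducer (sequence : String) (lower_bound : String) (upper_bound : String) (out : List Int) : Prop := out = binary_reducer_alt sequence lower_bound upper_bound
instance (sequence : String) (lower_bound : String) (upper_bound : String) (out : List Int) : Decidable (Spec_binary_reducer sequence lower_bound upper_bound out) := by unfold Spec_binary_reducer; infer_instance

-- ===== CLAIM (what is proved, stated in full; the proofs are below) =====
def Claim_equal_binary_reducer : Prop := ∀ (sequence : String) (lower_bound : String) (upper_bound : String), Dom_binary_reducer sequence lower_bound upper_bound → Spec_binary_reducer sequence lower_bound upper_bound (binary_reducer sequence lower_bound upper_bound)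

-- ===== LEMMAS AND PROOFS =====

lemma pyRange_drop (k : Nat) : ∀ (lo hi : Int),
    (PySem.List.pyRange lo hi 1).drop k = PySem.List.pyRange (lo + k) hi 1 := by
  induction k with
  | zero => intro lo hi; simp
  | succ k ih =>
    intro lo hi
    by_cases h : lo < hi
    · rw [PySem.List.pyRange_one_cons h]
      simp only [List.drop_succ_cons, ih (lo + 1) hi]
      congr 1
      push_cast
      ring
    · rw [PySem.List.pyRange_one_eq_nil (by omega), PySem.List.pyRange_one_eq_nil (by omega)]
      simp

lemma pyRange_take (k : Nat) : ∀ (lo hi : Int),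
    (PySem.List.pyRange lo hi 1).take k = PySem.List.pyRange lo (min hi (lo + k)) 1 := by
  induction k with
  | zero =>
    intro lo hi
    simp only [List.take_zero]
    rw [PySem.List.pyRange_one_eq_nil (by omega)]
  | succ k ih =>
    intro lo hi
    by_cases h : lo < hi
    · rw [PySem.List.pyRange_one_cons h, PySem.List.pyRange_one_cons (b := min hi (lo + (k + 1 : Nat)))
        (by push_cast; omega)]
      simp only [List.take_succ_cons, ih (lo + 1) hi]
      congr 2
      push_cast
      omega
    · rw [PySem.List.pyRange_one_eq_nil (by omega), PySem.List.pyRange_one_eq_nil (by omega)]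
      simp

-- the alt loop only adds to the consumed counter: shifting its start shifts its result
lemma alt_loop_consumed_shift (lower_bound upper_bound : String) : ∀ (cs : List Char) (code : Int) (k : Nat),
    binary_reducer_alt_loop lower_bound upper_bound cs code k
      = ((binary_reducer_alt_loop lower_bound upper_bound cs code 0).1,
         k + (binary_reducer_alt_loop lower_bound upper_bound cs code 0).2) := by
  intro cs
  induction cs with
  | nil => intro code k; simp [binary_reducer_alt_loop]
  | cons c rest ih =>
    intro code k
    simp only [binary_reducer_alt_loop]
    split_ifs <;> [skip; skip; simp] <;>
      · rw [ih _ (k + 1), ih _ (0 + 1)]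
        simp only [Prod.mk.injEq, true_and]
        omega

-- main invariant: A's loop over the interval [code·2^|cs|, (code+1)·2^|cs|) matches B's bit loop
lemma loop_eq (lower_bound upper_bound : String) : ∀ (cs : List Char) (code : Int),
    binary_reducer_loop lower_bound upper_bound cs
        (PySem.List.pyRange (code * 2 ^ cs.length) ((code + 1) * 2 ^ cs.length) 1)
      = (let p := binary_reducer_alt_loop lower_bound upper_bound cs code 0
         PySem.List.pyRange (p.1 * 2 ^ (cs.length - p.2)) ((p.1 + 1) * 2 ^ (cs.length - p.2)) 1) := by
  intro cs
  induction cs with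
  | nil => intro code; simp [binary_reducer_loop, binary_reducer_alt_loop]
  | cons c rest ih =>
    intro code
    have hpow : (0 : Int) < 2 ^ rest.length := by positivity
    have hsz : (2 : Int) ^ (c :: rest).length = 2 * 2 ^ rest.length := by
      simp [pow_succ]; ring
    have hdiff : (code + 1) * 2 ^ (c :: rest).length - code * 2 ^ (c :: rest).length
        = 2 * 2 ^ rest.length := by rw [hsz]; ring
    have hlen : ((PySem.List.pyRange (code * 2 ^ (c :: rest).length)
        ((code + 1) * 2 ^ (c :: rest).length) 1).length : Int) = 2 * 2 ^ rest.length := by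
      rw [PySem.List.length_pyRange_one]
      omega
    have hhalf : PySem.Int.floordiv ((PySem.List.pyRange (code * 2 ^ (c :: rest).length)
        ((code + 1) * 2 ^ (c :: rest).length) 1).length : Int) 2 = 2 ^ rest.length := by
      rw [hlen, PySem.Int.floordiv_eq_ediv_of_pos (by omega)]
      omega
    simp only [binary_reducer_loop, binary_reducer_alt_loop, hhalf]
    split_ifs with h1 h2
    · -- upper half: the next bit of code is 1
      rw [PySem.List.slice_from _ hpow.le, pyRange_drop, Int.toNat_of_nonneg hpow.le,
          show code * 2 ^ (c :: rest).length + 2 ^ rest.length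
              = (2 * code + 1) * 2 ^ rest.length by rw [hsz]; ring,
          show (code + 1) * 2 ^ (c :: rest).length
              = ((2 * code + 1) + 1) * 2 ^ rest.length by rw [hsz]; ring,
          ih (2 * code + 1),
          alt_loop_consumed_shift lower_bound upper_bound rest (2 * code + 1) (0 + 1)]
      dsimp only [List.length_cons]
      rw [show rest.length + 1
            - (0 + 1 + (binary_reducer_alt_loop lower_bound upper_bound rest (2 * code + 1) 0).2)
          = rest.length - (binary_reducer_alt_loop lower_bound upper_bound rest (2 * code + 1) 0).2
          by omega]
    · -- lower half: the next bit of code is 0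
      rw [PySem.List.slice_to _ hpow.le, pyRange_take, Int.toNat_of_nonneg hpow.le,
          show min ((code + 1) * 2 ^ (c :: rest).length)
                   (code * 2 ^ (c :: rest).length + 2 ^ rest.length)
              = ((2 * code) + 1) * 2 ^ rest.length by
            rw [hsz, min_eq_right (by nlinarith)]; ring,
          show code * 2 ^ (c :: rest).length = (2 * code) * 2 ^ rest.length by rw [hsz]; ring,
          ih (2 * code),
          alt_loop_consumed_shift lower_bound upper_bound rest (2 * code) (0 + 1)]
      dsimp only [List.length_cons]
      rw [show rest.length + 1
            - (0 + 1 + (binary_reducer_alt_loop lower_bound upper_bound rest (2 * code) 0).2)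
          = rest.length - (binary_reducer_alt_loop lower_bound upper_bound rest (2 * code) 0).2
          by omega]
    · -- break: nothing consumed, the interval is returned as is
      simp

-- ===== VERDICT (by name: the statement is the Claim_ definition above) =====
theorem binary_reducer_spec : Claim_equal_binary_reducer := by
  intro sequence lower_bound upper_bound _
  unfold Spec_binary_reducer binary_reducer binary_reducer_alt
  have := loop_eq lower_bound upper_bound sequence.toList 0
  simpa using this
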